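-- pv_equiv track=rewrite | github.com/trevormckaya/CS555GroupTwo | GEDCOM2/main.py | are_all_ids_unique
-- ===== SOURCE A (Python) =====
-- def are_all_ids_unique(individuals, families):
--     all_ids = set()
--
--
--     for individual in individuals:
--         individual_id = individual.get('ID', '')
--         if individual_id in all_ids:
--             return False
--         all_ids.add(individual_id)
--
--     # Check family IDs
--     for family in families:
--         family_id = family.get('FAM', '')
--         if family_id in all_ids:
--             return False
--         all_ids.add(family_id)
--
--     return True
-- ===== SOURCE B (Python) =====
-- def are_all_ids_unique(individuals, families):
--     all_ids = [ind.get('ID', '') for ind in individuals] + \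
--               [fam.get('FAM', '') for fam in families]
--     return len(all_ids) == len(set(all_ids))
-- ===== Notes on version B (the rewrite author's own statement) =====
-- stated objective: simpler
-- what changed: Replaces the fused early-exit loop with per-element membership tests by collecting all IDs into one list and comparing its length with its set's cardinality.
import Mathlib
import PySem

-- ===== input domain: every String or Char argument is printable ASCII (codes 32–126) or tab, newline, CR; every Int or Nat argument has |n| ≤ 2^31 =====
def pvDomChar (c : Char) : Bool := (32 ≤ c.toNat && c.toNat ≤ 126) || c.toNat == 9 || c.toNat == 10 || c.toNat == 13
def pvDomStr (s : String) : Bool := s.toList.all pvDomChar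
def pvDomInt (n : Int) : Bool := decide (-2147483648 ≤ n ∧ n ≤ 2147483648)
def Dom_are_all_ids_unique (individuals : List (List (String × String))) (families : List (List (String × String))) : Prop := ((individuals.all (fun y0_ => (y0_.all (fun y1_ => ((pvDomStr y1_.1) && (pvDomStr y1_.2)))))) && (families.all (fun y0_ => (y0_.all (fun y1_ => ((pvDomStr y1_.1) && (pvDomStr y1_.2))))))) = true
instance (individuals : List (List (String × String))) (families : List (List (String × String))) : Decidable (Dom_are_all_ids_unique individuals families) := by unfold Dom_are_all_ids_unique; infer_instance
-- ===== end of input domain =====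

-- B replaces A's fused early-exit loop (per-element set-membership tests) by collecting every ID
-- into one list and comparing its length with the cardinality of the set built from it (simpler).

-- ===== PORT A =====
-- first loop of A: threads the 'all_ids' set; 'none' encodes the early 'return False'
def pvIndLoop (inds : List (List (String × String))) (allIds : PySem.Set String) :
    Option (PySem.Set String) :=
  match inds with
  | [] => some allIds
  | individual :: rest =>
    let individual_id := PySem.Dict.getD (PySem.Dict.mk individual) "ID" ""
    if PySem.Set.contains allIds individual_id then none
    else pvIndLoop rest (PySem.Set.add allIds individual_id)

-- second loop of A: returns the function's final Bool
def pvFamLoop (fams : List (List (String × String))) (allIds : PySem.Set String) : Bool :=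
  match fams with
  | [] => true
  | family :: rest =>
    let family_id := PySem.Dict.getD (PySem.Dict.mk family) "FAM" ""
    if PySem.Set.contains allIds family_id then false
    else pvFamLoop rest (PySem.Set.add allIds family_id)

def are_all_ids_unique (individuals : List (List (String × String))) (families : List (List (String × String))) : Bool :=
  match pvIndLoop individuals PySem.Set.empty with
  | none => false
  | some allIds => pvFamLoop families allIds

-- ===== PORT B =====
def are_all_ids_unique_alt (individuals : List (List (String × String))) (families : List (List (String × String))) : Bool :=
  let all_ids :=
    individuals.map (fun ind => PySem.Dict.getD (PySem.Dict.mk ind) "ID" "") ++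
    families.map (fun fam => PySem.Dict.getD (PySem.Dict.mk fam) "FAM" "")
  all_ids.length == (PySem.Set.ofList all_ids).length

-- ===== PRECONDITION & SPEC =====
def Spec_are_all_ids_unique (individuals : List (List (String × String))) (families : List (List (String × String))) (out : Bool) : Prop := out = are_all_ids_unique_alt individuals families
instance (individuals : List (List (String × String))) (families : List (List (String × String))) (out : Bool) : Decidable (Spec_are_all_ids_unique individuals families out) := by unfold Spec_are_all_ids_unique; infer_instance

-- ===== CLAIM (what is proved, stated in full; the proofs are below) =====
def Claim_equal_are_all_ids_unique : Prop := ∀ (individuals : List (List (String × String))) (families : List (List (String × String))), Dom_are_all_ids_unique individuals families → Spec_are_all_ids_unique individuals families (are_all_ids_unique individuals families)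

-- ===== LEMMAS AND PROOFS =====

-- A's first loop, with a duplicate-free accumulator s, succeeds iff (s ++ ids).Nodup,
-- and then the final set is literally s ++ ids.
theorem pvIndLoop_eq (inds : List (List (String × String))) (s : List String) (hs : s.Nodup) :
    pvIndLoop inds s =
      if (s ++ inds.map (fun ind => PySem.Dict.getD (PySem.Dict.mk ind) "ID" "")).Nodup
      then some (s ++ inds.map (fun ind => PySem.Dict.getD (PySem.Dict.mk ind) "ID" ""))
      else none := by
  induction inds generalizing s with
  | nil => simp [pvIndLoop, hs]
  | cons ind rest ih =>
    by_cases hmem : PySem.Dict.getD (PySem.Dict.mk ind) "ID" "" ∈ s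
    · have hnd : ¬ (s ++ (ind :: rest).map (fun ind => PySem.Dict.getD (PySem.Dict.mk ind) "ID" "")).Nodup := by
        intro h
        exact (List.nodup_append.mp h).2.2 _ hmem _ (by simp) rfl
      simp only [List.map_cons] at hnd
      simp [pvIndLoop, PySem.Set.contains, hmem, hnd]
    · have hadd : PySem.Set.add s (PySem.Dict.getD (PySem.Dict.mk ind) "ID" "") =
          s ++ [PySem.Dict.getD (PySem.Dict.mk ind) "ID" ""] := by
        simp [PySem.Set.add, PySem.Set.contains, hmem]
      have hsx : (s ++ [PySem.Dict.getD (PySem.Dict.mk ind) "ID" ""]).Nodup := by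
        refine hs.append (List.nodup_singleton _) ?_
        intro a ha hb
        simp only [List.mem_singleton] at hb
        exact hmem (hb ▸ ha)
      simp only [pvIndLoop, PySem.Set.contains, List.contains_iff_mem]
      rw [if_neg (by simpa using hmem), hadd, ih _ hsx,
        List.map_cons, List.append_cons, List.append_assoc]
      simp

-- A's second loop, with a duplicate-free set s, returns exactly whether (s ++ ids) is duplicate-free.
theorem pvFamLoop_eq (fams : List (List (String × String))) (s : List String) (hs : s.Nodup) :
    pvFamLoop fams s =
      decide (s ++ fams.map (fun fam => PySem.Dict.getD (PySem.Dict.mk fam) "FAM" "")).Nodup := by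
  induction fams generalizing s with
  | nil => simp [pvFamLoop, hs]
  | cons fam rest ih =>
    by_cases hmem : PySem.Dict.getD (PySem.Dict.mk fam) "FAM" "" ∈ s
    · have hnd : ¬ (s ++ (fam :: rest).map (fun fam => PySem.Dict.getD (PySem.Dict.mk fam) "FAM" "")).Nodup := by
        intro h
        exact (List.nodup_append.mp h).2.2 _ hmem _ (by simp) rfl
      simp only [List.map_cons] at hnd
      simp [pvFamLoop, PySem.Set.contains, hmem, hnd]
    · have hadd : PySem.Set.add s (PySem.Dict.getD (PySem.Dict.mk fam) "FAM" "") =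
          s ++ [PySem.Dict.getD (PySem.Dict.mk fam) "FAM" ""] := by
        simp [PySem.Set.add, PySem.Set.contains, hmem]
      have hsx : (s ++ [PySem.Dict.getD (PySem.Dict.mk fam) "FAM" ""]).Nodup := by
        refine hs.append (List.nodup_singleton _) ?_
        intro a ha hb
        simp only [List.mem_singleton] at hb
        exact hmem (hb ▸ ha)
      simp only [pvFamLoop, PySem.Set.contains, List.contains_iff_mem]
      rw [if_neg (by simpa using hmem), hadd, ih _ hsx,
        List.map_cons, List.append_cons, List.append_assoc]
      simp

theorem pvUpdate_len_le (l s : List String) :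
    (PySem.Set.update s l).length ≤ s.length + l.length := by
  induction l generalizing s with
  | nil => simp [PySem.Set.update]
  | cons y ys ih =>
    have h1 : (PySem.Set.add s y).length ≤ s.length + 1 := by
      by_cases hy : y ∈ s <;> simp [PySem.Set.add, PySem.Set.contains, hy]
    calc (PySem.Set.update s (y :: ys)).length
        = (PySem.Set.update (PySem.Set.add s y) ys).length := rfl
      _ ≤ (PySem.Set.add s y).length + ys.length := ih (PySem.Set.add s y)
      _ ≤ (s.length + 1) + ys.length := Nat.add_le_add_right h1 _
      _ = s.length + (y :: ys).length := by simp only [List.length_cons]; omega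

-- set(xs) has as many elements as xs iff xs has no duplicates (via Set.update with accumulator s)
theorem pvUpdate_len_eq_iff (l s : List String) (hs : s.Nodup) :
    (PySem.Set.update s l).length = s.length + l.length ↔ (s ++ l).Nodup := by
  induction l generalizing s with
  | nil => simp [PySem.Set.update, hs]
  | cons x rest ih =>
    by_cases hmem : x ∈ s
    · have hc : PySem.Set.add s x = s := by
        simp [PySem.Set.add, PySem.Set.contains, hmem]
      have hle := pvUpdate_len_le rest s
      have hnot : ¬ (s ++ x :: rest).Nodup := by
        intro h
        exact (List.nodup_append.mp h).2.2 _ hmem _ (by simp) rfl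
      have hstep : PySem.Set.update s (x :: rest) = PySem.Set.update s rest := by
        simp [PySem.Set.update, List.foldl_cons, hc]
      constructor
      · intro h; rw [hstep] at h; exfalso; simp at h; omega
      · exact fun h => absurd h hnot
    · have hadd : PySem.Set.add s x = s ++ [x] := by
        simp [PySem.Set.add, PySem.Set.contains, hmem]
      have hsx : (s ++ [x]).Nodup := by
        refine hs.append (List.nodup_singleton _) ?_
        intro a ha hb
        simp only [List.mem_singleton] at hb
        exact hmem (hb ▸ ha)
      have hstep : PySem.Set.update s (x :: rest) = PySem.Set.update (s ++ [x]) rest := by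
        simp [PySem.Set.update, List.foldl_cons, hadd]
      have hlen : s.length + (x :: rest).length = (s ++ [x]).length + rest.length := by
        simp only [List.length_append, List.length_cons, List.length_nil]; omega
      have hform : (s ++ [x]) ++ rest = s ++ x :: rest := by simp
      rw [hstep, hlen, ih (s ++ [x]) hsx, hform]

theorem pvOfList_len_eq_iff (l : List String) :
    ((PySem.Set.ofList l).length = l.length ↔ l.Nodup) := by
  have := pvUpdate_len_eq_iff l [] (by simp)
  simpa [PySem.Set.ofList, PySem.Set.update, PySem.Set.empty] using this

-- B's cardinality comparison, as a Bool, decides duplicate-freeness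
theorem pvBeq_len_eq (l : List String) :
    (l.length == (PySem.Set.ofList l).length) = decide l.Nodup := by
  by_cases h : l.Nodup
  · simp [h, (pvOfList_len_eq_iff l).mpr h]
  · have hne : ¬ l.length = (PySem.Set.ofList l).length :=
      fun he => h ((pvOfList_len_eq_iff l).mp he.symm)
    simp [h, hne]

-- ===== VERDICT (by name: the statement is the Claim_ definition above) =====
theorem are_all_ids_unique_spec : Claim_equal_are_all_ids_unique := by
  intro individuals families _
  unfold Spec_are_all_ids_unique are_all_ids_unique are_all_ids_unique_alt
  simp only [pvBeq_len_eq]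
  rw [pvIndLoop_eq individuals PySem.Set.empty (by simp [PySem.Set.empty])]
  by_cases hn : (individuals.map (fun ind => PySem.Dict.getD (PySem.Dict.mk ind) "ID" "")).Nodup
  · rw [if_pos (by simpa [PySem.Set.empty] using hn)]
    simp only []
    rw [pvFamLoop_eq families _ (by simpa [PySem.Set.empty] using hn)]
    simp [PySem.Set.empty]
  · rw [if_neg (by simpa [PySem.Set.empty] using hn)]
    have h2 : ¬ ((individuals.map (fun ind => PySem.Dict.getD (PySem.Dict.mk ind) "ID" "")) ++
        (families.map (fun fam => PySem.Dict.getD (PySem.Dict.mk fam) "FAM" ""))).Nodup :=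
      fun h => hn h.of_append_left
    simp [h2]
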